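-- pv_equiv track=rewrite | github.com/pearl9582/Extractor | reRank.py | numSimilarity
-- ===== SOURCE A (Python) =====
-- def numSimilarity(resPNum, p_Num):
--     '''
--
--     :param resPNum:
--     :param p_Num:
--     :return: 返回每个句子与标准P的相同数字个数
--     '''
--     result = []
--     number = 0
--     for rp in resPNum:
--         for n in rp:
--             for pn in p_Num:
--                 if n == pn:
--                     number = number +1
--         result.append(number)
--         number = 0
--     return result
-- ===== SOURCE B (Python) =====
-- def numSimilarity(resPNum, p_Num):
--     cnt = {}
--     for pn in p_Num:
--         cnt[pn] = cnt.get(pn, 0) + 1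
--     return [sum(cnt.get(n, 0) for n in rp) for rp in resPNum]
-- ===== Notes on version B (the rewrite author's own statement) =====
-- stated objective: faster
-- what changed: Builds a hash Counter of p_Num once, then each sentence's score is a single pass summing counts, replacing the nested per-element scan of p_Num.
import Mathlib
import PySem

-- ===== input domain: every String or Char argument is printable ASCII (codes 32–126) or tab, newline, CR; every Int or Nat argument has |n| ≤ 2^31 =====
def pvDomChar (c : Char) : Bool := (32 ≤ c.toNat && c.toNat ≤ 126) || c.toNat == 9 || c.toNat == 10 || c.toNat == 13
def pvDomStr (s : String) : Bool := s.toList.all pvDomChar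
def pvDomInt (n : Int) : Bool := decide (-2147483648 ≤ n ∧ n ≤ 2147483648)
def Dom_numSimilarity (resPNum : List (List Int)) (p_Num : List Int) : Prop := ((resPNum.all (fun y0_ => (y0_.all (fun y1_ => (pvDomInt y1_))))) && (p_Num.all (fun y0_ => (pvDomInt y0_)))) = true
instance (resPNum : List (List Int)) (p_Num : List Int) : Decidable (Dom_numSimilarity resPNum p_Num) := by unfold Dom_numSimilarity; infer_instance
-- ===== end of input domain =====

-- ===== PORT A =====
def numSimilarity (resPNum : List (List Int)) (p_Num : List Int) : List Int :=
  (resPNum.foldl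
    (fun (st : List Int × Int) rp =>
      let number := rp.foldl
        (fun nb n => p_Num.foldl (fun nb2 pn => if n == pn then nb2 + 1 else nb2) nb)
        st.2
      (st.1 ++ [number], 0))
    ([], 0)).1

-- ===== PORT B =====
-- one honest line: B builds a count dictionary of p_Num once, then sums lookups per sentence (faster: no inner scan of p_Num)
def numSimilarity_alt (resPNum : List (List Int)) (p_Num : List Int) : List Int :=
  let cnt := p_Num.foldl (fun d pn => d.insert pn (d.getD pn 0 + 1)) PySem.Dict.empty
  resPNum.map (fun rp => rp.foldl (fun s n => s + cnt.getD n 0) 0)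

-- ===== PRECONDITION & SPEC =====
def Spec_numSimilarity (resPNum : List (List Int)) (p_Num : List Int) (out : List Int) : Prop := out = numSimilarity_alt resPNum p_Num
instance (resPNum : List (List Int)) (p_Num : List Int) (out : List Int) : Decidable (Spec_numSimilarity resPNum p_Num out) := by unfold Spec_numSimilarity; infer_instance

-- ===== CLAIM (what is proved, stated in full; the proofs are below) =====
def Claim_equal_numSimilarity : Prop := ∀ (resPNum : List (List Int)) (p_Num : List Int), Dom_numSimilarity resPNum p_Num → Spec_numSimilarity resPNum p_Num (numSimilarity resPNum p_Num)

-- ===== LEMMAS AND PROOFS =====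

theorem innerA_eq_count (p_Num : List Int) (n nb : Int) :
    p_Num.foldl (fun nb2 pn => if n == pn then nb2 + 1 else nb2) nb = nb + p_Num.count n := by
  induction p_Num generalizing nb with
  | nil => simp
  | cons pn rest ih =>
    simp only [List.foldl_cons, List.count_cons, ih]
    by_cases h : n = pn
    · simp [h, beq_iff_eq]
      ring
    · have h2 : (pn == n) = false := by simp [Ne.symm h]
      simp [h, h2, Ne.symm h]

theorem sentence_eq (p_Num rp : List Int) (nb : Int) :
    rp.foldl (fun nb n => p_Num.foldl (fun nb2 pn => if n == pn then nb2 + 1 else nb2) nb) nb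
      = rp.foldl
          (fun s n =>
            s + (p_Num.foldl (fun d pn => d.insert pn (d.getD pn 0 + 1)) PySem.Dict.empty).getD n 0)
          nb := by
  induction rp generalizing nb with
  | nil => rfl
  | cons n rest ih =>
    simp only [List.foldl_cons, ih, innerA_eq_count,
      PySem.Dict.foldl_insert_getD_add_one_eq_counter, PySem.Dict.getD_counter,
      PySem.Dict.getD_empty]

theorem foldlA_eq (p_Num : List Int) (resPNum : List (List Int)) (acc : List Int) :
    (resPNum.foldl
      (fun (st : List Int × Int) rp =>
        let number := rp.foldl
          (fun nb n => p_Num.foldl (fun nb2 pn => if n == pn then nb2 + 1 else nb2) nb)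
          st.2
        (st.1 ++ [number], 0))
      (acc, 0)).1
      = acc ++ resPNum.map (fun rp =>
          rp.foldl
            (fun s n =>
              s + (p_Num.foldl (fun d pn => d.insert pn (d.getD pn 0 + 1)) PySem.Dict.empty).getD n 0)
            0) := by
  induction resPNum generalizing acc with
  | nil => simp
  | cons rp rest ih =>
    simp only [List.foldl_cons, List.map_cons]
    rw [sentence_eq p_Num rp 0, ih]
    simp

-- ===== VERDICT (by name: the statement is the Claim_ definition above) =====
theorem numSimilarity_spec : Claim_equal_numSimilarity := by
  intro resPNum p_Num _
  unfold Spec_numSimilarity numSimilarity numSimilarity_alt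
  simpa using foldlA_eq p_Num resPNum []
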